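-- pv_equiv track=rewrite | github.com/k-harada/AtCoder | ABC/ABC251-300/ABC295/C.py | solve
-- ===== SOURCE A (Python) =====
-- from collections import defaultdict
--
-- def solve(n, a_list):
--     counter = defaultdict(int)
--     for a in a_list:
--         counter[a] += 1
--     res = 0
--     for v in counter.values():
--         res += v // 2
--     return res
-- ===== SOURCE B (Python) =====
-- def solve(n, a_list):
--     total = 0
--     run = 0
--     prev = None
--     for x in sorted(a_list):
--         if prev is not None and x == prev:
--             run += 1
--         else:
--             total += run // 2
--             run = 1
--             prev = x
--     return total + run // 2
-- ===== Notes on version B (the rewrite author's own statement) =====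
-- stated objective: alternative
-- what changed: Replaces the hash-based frequency dict (Counter then sum of v//2) by sorting the list and doing one linear run-length scan, adding run//2 at each value change.
import Mathlib
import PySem

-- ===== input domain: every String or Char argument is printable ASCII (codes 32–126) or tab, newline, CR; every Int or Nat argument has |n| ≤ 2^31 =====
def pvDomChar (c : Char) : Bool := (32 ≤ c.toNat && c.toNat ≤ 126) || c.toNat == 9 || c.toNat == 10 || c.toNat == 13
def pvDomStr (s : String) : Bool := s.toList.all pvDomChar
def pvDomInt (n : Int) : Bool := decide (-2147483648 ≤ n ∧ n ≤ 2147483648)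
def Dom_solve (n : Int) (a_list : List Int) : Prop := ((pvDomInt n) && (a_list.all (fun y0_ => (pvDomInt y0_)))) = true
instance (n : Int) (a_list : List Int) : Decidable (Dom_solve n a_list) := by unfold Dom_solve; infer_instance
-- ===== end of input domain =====

-- B replaces A's frequency dictionary by a sort followed by one run-length scan (alternative algorithm, not faster).

-- ===== PORT A =====
def solve (n : Int) (a_list : List Int) : Int :=
  let counter : PySem.Dict Int Int :=
    a_list.foldl (fun d a => d.modify a 0 (· + 1)) PySem.Dict.empty
  counter.values.foldl (fun res v => res + PySem.Int.floordiv v 2) 0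

-- ===== PORT B =====
-- state = (prev, run, total)
def solveAltStep (st : Option Int × Int × Int) (x : Int) : Option Int × Int × Int :=
  if st.1 = some x then (st.1, st.2.1 + 1, st.2.2)
  else (some x, 1, st.2.2 + PySem.Int.floordiv st.2.1 2)

def finishB (st : Option Int × Int × Int) : Int := st.2.2 + PySem.Int.floordiv st.2.1 2

def solve_alt (n : Int) (a_list : List Int) : Int :=
  finishB ((PySem.List.sorted a_list (fun x => x)).foldl solveAltStep (none, 0, 0))

-- ===== PRECONDITION & SPEC =====
def Spec_solve (n : Int) (a_list : List Int) (out : Int) : Prop := out = solve_alt n a_list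
instance (n : Int) (a_list : List Int) (out : Int) : Decidable (Spec_solve n a_list out) := by unfold Spec_solve; infer_instance

-- ===== CLAIM (what is proved, stated in full; the proofs are below) =====
def Claim_equal_solve : Prop := ∀ (n : Int) (a_list : List Int), Dom_solve n a_list → Spec_solve n a_list (solve n a_list)

-- ===== LEMMAS AND PROOFS =====

-- common value: sum over the distinct values of s of (count in s) // 2
def pairSum (s : List Int) : Int :=
  ((PySem.List.dedup s).map (fun k => PySem.Int.floordiv (s.count k : Int) 2)).sum

lemma solve_eq_pairSum (n : Int) (xs : List Int) : solve n xs = pairSum xs := by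
  show (PySem.Dict.counter xs).values.foldl (fun res v => res + PySem.Int.floordiv v 2) 0
      = pairSum xs
  rw [PySem.List.foldl_add]
  show 0 + (((PySem.Dict.counter xs).items.map (·.2)).map
      (fun v => PySem.Int.floordiv v 2)).sum = pairSum xs
  rw [PySem.Dict.items_counter]
  simp [pairSum, List.map_map, Function.comp_def]

lemma pairSum_perm {xs ys : List Int} (h : xs.Perm ys) : pairSum xs = pairSum ys := by
  unfold pairSum
  have hd : (PySem.List.dedup xs).Perm (PySem.List.dedup ys) := by
    refine (List.perm_ext_iff_of_nodup (PySem.List.nodup_dedup xs) (PySem.List.nodup_dedup ys)).2 ?_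
    intro a
    rw [PySem.List.mem_dedup xs a, PySem.List.mem_dedup ys a, h.mem_iff]
  rw [← (hd.map (fun k => PySem.Int.floordiv (ys.count k : Int) 2)).sum_eq]
  congr 1
  apply List.map_congr_left
  intro k _
  rw [h.count_eq]

-- extracting one present value from pairSum
lemma pairSum_extract {s : List Int} {x : Int} (hx : x ∈ s) :
    pairSum s = PySem.Int.floordiv (s.count x : Int) 2 + pairSum (s.filter (fun y => y != x)) := by
  unfold pairSum
  have hxd : x ∈ PySem.List.dedup s := (PySem.List.mem_dedup s x).2 hx
  have hperm := List.perm_cons_erase hxd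
  rw [(hperm.map (fun k => PySem.Int.floordiv (s.count k : Int) 2)).sum_eq]
  simp only [List.map_cons, List.sum_cons]
  congr 1
  have hnd := PySem.List.nodup_dedup s
  have hperm2 : ((PySem.List.dedup s).erase x).Perm
      (PySem.List.dedup (s.filter (fun y => y != x))) := by
    refine (List.perm_ext_iff_of_nodup (hnd.erase x)
      (PySem.List.nodup_dedup _)).2 ?_
    intro a
    rw [hnd.mem_erase_iff, PySem.List.mem_dedup, PySem.List.mem_dedup]
    simp only [List.mem_filter, bne_iff_ne]
    tauto
  rw [← (hperm2.map (fun k => PySem.Int.floordiv ((s.filter (fun y => y != x)).count k : Int) 2)).sum_eq]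
  refine congrArg List.sum (List.map_congr_left ?_)
  intro k hk
  have hkx : k ≠ x := (hnd.mem_erase_iff.1 hk).1
  rw [List.count_filter]
  simp [hkx]

-- run-length scan invariant on a sorted suffix all ≥ p
lemma foldB_inv (s : List Int) (p r t : Int)
    (hs : s.Pairwise (· ≤ ·)) (hp : ∀ y ∈ s, p ≤ y) :
    finishB (s.foldl solveAltStep (some p, r, t))
      = t + PySem.Int.floordiv (r + (s.count p : Int)) 2
          + pairSum (s.filter (fun y => y != p)) := by
  induction s generalizing p r t with
  | nil => simp [pairSum, PySem.List.dedup, finishB]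
  | cons x s' ih =>
    have hs' : s'.Pairwise (· ≤ ·) := hs.of_cons
    have hxle : ∀ y ∈ s', x ≤ y := fun y hy => (List.pairwise_cons.1 hs).1 y hy
    by_cases hxp : x = p
    · subst hxp
      simp only [List.foldl_cons, solveAltStep, if_true]
      rw [ih x (r + 1) t hs' hxle]
      have hc : ((x :: s').count x : Int) = (s'.count x : Int) + 1 := by
        rw [List.count_cons_self]; push_cast; ring
      rw [hc]
      have hf : (x :: s').filter (fun y => y != x) = s'.filter (fun y => y != x) := by
        simp
      rw [hf]
      ring_nf
    · have hplt : p < x := lt_of_le_of_ne (hp x (List.mem_cons_self)) (fun h => hxp h.symm)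
      have hpnot : p ∉ (x :: s') := by
        intro hmem
        rcases List.mem_cons.1 hmem with h | h
        · exact hxp h.symm
        · exact absurd (hxle p h) (by omega)
      simp only [List.foldl_cons, solveAltStep]
      rw [if_neg (by simpa using fun h => hxp h.symm)]
      rw [ih x 1 (t + PySem.Int.floordiv r 2) hs' hxle]
      have hc0 : ((x :: s').count p : Int) = 0 := by
        rw [List.count_eq_zero.2 hpnot]; rfl
      rw [hc0]
      have hfp : (x :: s').filter (fun y => y != p) = x :: s' := by
        apply List.filter_eq_self.2
        intro a ha
        simp only [bne_iff_ne, ne_eq]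
        intro h; exact hpnot (h ▸ ha)
      rw [hfp]
      rw [pairSum_extract (List.mem_cons_self (a := x) (l := s'))]
      have hcx : ((x :: s').count x : Int) = 1 + (s'.count x : Int) := by
        rw [List.count_cons_self]; push_cast; ring
      have hfx : (x :: s').filter (fun y => y != x) = s'.filter (fun y => y != x) := by simp
      rw [hcx, hfx]
      ring_nf

lemma solve_alt_eq_pairSum (n : Int) (xs : List Int) :
    solve_alt n xs = pairSum (PySem.List.sorted xs (fun x => x)) := by
  unfold solve_alt
  generalize hS : PySem.List.sorted xs (fun x => x) = s
  have hs : s.Pairwise (· ≤ ·) := by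
    have := PySem.List.sorted_pairwise xs (fun x => x)
    rw [hS] at this; simpa using this
  cases s with
  | nil => simp [pairSum, PySem.List.dedup, finishB]
  | cons x s' =>
    simp only [List.foldl_cons, solveAltStep]
    rw [if_neg (by simp)]
    have hxle : ∀ y ∈ s', x ≤ y := fun y hy => (List.pairwise_cons.1 hs).1 y hy
    rw [foldB_inv s' x 1 (0 + PySem.Int.floordiv 0 2) hs.of_cons hxle]
    rw [pairSum_extract (List.mem_cons_self (a := x) (l := s'))]
    have hcx : ((x :: s').count x : Int) = 1 + (s'.count x : Int) := by
      rw [List.count_cons_self]; push_cast; ring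
    have hfx : (x :: s').filter (fun y => y != x) = s'.filter (fun y => y != x) := by simp
    rw [hcx, hfx]
    norm_num

-- ===== VERDICT (by name: the statement is the Claim_ definition above) =====
theorem solve_spec : Claim_equal_solve := by
  intro n a_list _
  show solve n a_list = solve_alt n a_list
  rw [solve_eq_pairSum, solve_alt_eq_pairSum]
  exact pairSum_perm (PySem.List.sorted_perm ..).symm
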